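-- pv_equiv track=rewrite | github.com/arom0808/olympiads | tinkoff/algo_students_2023/DAG/C_Python/main.py | generate_support_data
-- ===== SOURCE A (Python) =====
-- from collections import deque
--
-- def generate_support_data(n: int, graph: dict[int, list[int]], time_to_do: list[int]):
--     used = [False for _ in range(n)]
--     counter, result_detail_cnt, result_time = 0, 0, 0
--     counters_on_ids = [0 for _ in range(n)]
--     stack: deque[tuple[int, int]] = deque()
--     stack.append((0, 0))
--     while len(stack) != 0:
--         now_act = stack.pop()
--         counter += 1
--         counters_on_ids[now_act[0]] = counter
--         if not used[now_act[0]]: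
--             result_time += time_to_do[now_act[0]]
--             result_detail_cnt += 1
--         used[now_act[0]] = True
--         sons = graph[now_act[0]]
--         if now_act[1] >= len(sons):
--             continue
--         stack.append((now_act[0], now_act[1] + 1))
--         next_son_id = sons[now_act[1]]
--         if counters_on_ids[next_son_id] == 0:
--             stack.append((next_son_id, 0))
--     id_on_count: dict[int, int] = dict()
--     for i in range(n):
--         if counters_on_ids[i] != 0:
--             id_on_count[counters_on_ids[i]] = i
--     return result_time, result_detail_cnt, id_on_count
-- ===== SOURCE B (Python) =====
-- def generate_support_data(n: int, graph: dict[int, list[int]], time_to_do: list[int]):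
--     visited = [False] * n
--     stamp = [0] * n
--     counter = 0
--     result_time = 0
--     result_detail_cnt = 0
--     visited[0] = True
--     result_time += time_to_do[0]
--     result_detail_cnt += 1
--     stack = [(0, iter(graph[0]))]
--     while stack:
--         v, it = stack[-1]
--         counter += 1
--         son = next(it, None)
--         if son is None:
--             stamp[v] = counter
--             stack.pop()
--         elif not visited[son]:
--             visited[son] = True
--             result_time += time_to_do[son]
--             result_detail_cnt += 1
--             stack.append((son, iter(graph[son])))
--     id_on_count: dict[int, int] = {}
--     for i in range(n):
--         if stamp[i] != 0:
--             id_on_count[stamp[i]] = i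
--     return result_time, result_detail_cnt, id_on_count
-- ===== Notes on version B (the rewrite author's own statement) =====
-- stated objective: simpler
-- what changed: Replaces A's deque of (node, next-child-index) frames - each frame re-pushed and the node re-stamped and re-checked against `used` on every pop - by the idiomatic peek-top stack of child iterators: a node is marked and accounted once when discovered, its iterator is advanced in place, and it is stamped once when the iterator is exhausted; the event counter advances once per loop iteration.
import Mathlib
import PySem

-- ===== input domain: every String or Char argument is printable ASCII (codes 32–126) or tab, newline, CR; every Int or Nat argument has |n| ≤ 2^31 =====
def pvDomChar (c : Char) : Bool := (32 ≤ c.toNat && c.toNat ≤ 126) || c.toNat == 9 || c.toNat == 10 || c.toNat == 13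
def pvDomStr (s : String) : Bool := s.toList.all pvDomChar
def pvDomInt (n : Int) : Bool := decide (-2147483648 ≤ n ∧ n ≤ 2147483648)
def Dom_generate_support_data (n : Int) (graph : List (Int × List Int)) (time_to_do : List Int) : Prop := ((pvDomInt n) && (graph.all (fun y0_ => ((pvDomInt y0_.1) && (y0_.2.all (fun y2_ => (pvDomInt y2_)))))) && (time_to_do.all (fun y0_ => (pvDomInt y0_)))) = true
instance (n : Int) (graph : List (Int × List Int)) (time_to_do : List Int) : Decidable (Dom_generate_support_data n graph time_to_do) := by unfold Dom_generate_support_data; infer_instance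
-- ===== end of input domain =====

-- B replaces A's deque of (node, child-index) frames — re-pushed and re-stamped on every pop — by a
-- ===== PORT A =====
-- Shared state record: (counter, result_time, result_detail_cnt, counters_on_ids, used).
structure PVSt where
  counter : Int
  rtime : Int
  rcnt : Int
  cids : List Int
  used : List Bool
deriving DecidableEq, Repr

-- list reads/writes, Python index semantics (negative wraps): exact on the -len ≤ i < len accesses
-- Pre_ admits (Python raises IndexError outside)
def pvGetI (xs : List Int) (i : Int) : Int := (PySem.List.pyGet? xs i).getD 0
def pvGetB (xs : List Bool) (i : Int) : Bool := (PySem.List.pyGet? xs i).getD false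
def pvSetI (xs : List Int) (i : Int) (v : Int) : List Int := PySem.List.pySetD xs i v
def pvSetB (xs : List Bool) (i : Int) (v : Bool) : List Bool := PySem.List.pySetD xs i v
-- graph[node] (KeyError excluded by Pre_)
def pvSons (graph : List (Int × List Int)) (nd : Int) : List Int := (PySem.Dict.mk graph).getD nd []

-- A's per-pop block: counter += 1; stamp; first-visit accounting; used := True
def pvVisit (time_to_do : List Int) (st : PVSt) (nd : Int) : PVSt :=
  let counter := st.counter + 1
  let cids := pvSetI st.cids nd counter
  let first := pvGetB st.used nd = false
  { counter := counter
    rtime := if first then st.rtime + pvGetI time_to_do nd else st.rtime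
    rcnt := if first then st.rcnt + 1 else st.rcnt
    cids := cids
    used := pvSetB st.used nd true }

-- the final scan both Pythons share verbatim: id_on_count[counters_on_ids[i]] = i for i in range(n)
def pvScan (n : Int) (st : PVSt) : PySem.Dict Int Int :=
  (PySem.List.pyRange 0 n 1).foldl
    (fun d i => if pvGetI st.cids i ≠ 0 then d.insert (pvGetI st.cids i) i else d) PySem.Dict.empty

-- fuel: one unit per pop (A) / per loop iteration (B); a totality device only — on Pre_ inputs the
-- equivalence below holds for every fuel value, and both ports use the same expression
def pvFuel (n : Int) (graph : List (Int × List Int)) : Nat :=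
  n.toNat + (graph.map (fun p => p.2.length)).sum + 1

-- A's while-loop over the explicit stack of (node, next-child-index) frames, one fuel unit per pop
def pvLoopA (graph : List (Int × List Int)) (tt : List Int) :
    Nat → List (Int × Int) → PVSt → PVSt
  | 0, _, st => st
  | _ + 1, [], st => st
  | f + 1, (nd, i) :: rest, st =>
    let st1 := pvVisit tt st nd
    let sons := pvSons graph nd
    if (sons.length : Int) ≤ i then pvLoopA graph tt f rest st1
    else
      let son := pvGetI sons i
      if pvGetI st1.cids son = 0 then pvLoopA graph tt f ((son, 0) :: (nd, i + 1) :: rest) st1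
      else pvLoopA graph tt f ((nd, i + 1) :: rest) st1

def generate_support_data (n : Int) (graph : List (Int × List Int)) (time_to_do : List Int) : Int × Int × (List (Int × Int)) :=
  let st0 : PVSt := ⟨0, 0, 0, List.replicate n.toNat 0, List.replicate n.toNat false⟩
  let st := pvLoopA graph time_to_do (pvFuel n graph) [(0, 0)] st0
  (st.rtime, st.rcnt, (pvScan n st).items)

-- ===== PORT B =====
-- B's frame: (node, sons not yet iterated, clock value at this frame's latest tick; 0 = not yet ticked).
-- The third component mirrors Source B's `stamp[v] = counter` write: on the normal path the stamp is
-- written from the current counter exactly as in Source B; it is carried in the frame only so that the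
-- fuel-out branch (a totality device — Source B's while loop has no fuel) leaves a well-defined state.
def pvPatch (frames : List (Int × List Int × Int)) (c : List Int) : List Int :=
  frames.foldl (fun c fr => if fr.2.2 ≠ 0 then pvSetI c fr.1 fr.2.2 else c) c

-- Source B accounts for a node (visited/time/count) when pushing it; the port performs the identical
-- update at the frame's first tick — the immediately following loop iteration, with no observable
-- point in between — so that the fuel-out state is well defined.
def pvLoopB (graph : List (Int × List Int)) (tt : List Int) :
    Nat → List (Int × List Int × Int) → PVSt → PVSt
  | 0, frames, st => { st with cids := pvPatch frames st.cids }
  | _ + 1, [], st => st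
  | f + 1, (v, rem, last) :: frs, st =>
    let c := st.counter + 1
    let st1 : PVSt :=
      if last = 0 then
        { counter := c, rtime := st.rtime + pvGetI tt v, rcnt := st.rcnt + 1,
          cids := st.cids, used := pvSetB st.used v true }
      else { st with counter := c }
    match rem with
    | [] => pvLoopB graph tt f frs { st1 with cids := pvSetI st1.cids v c }
    | son :: rem' =>
      if pvGetB st1.used son = true then pvLoopB graph tt f ((v, rem', c) :: frs) st1
      else pvLoopB graph tt f ((son, pvSons graph son, 0) :: (v, rem', c) :: frs) st1

def generate_support_data_alt (n : Int) (graph : List (Int × List Int)) (time_to_do : List Int) : Int × Int × (List (Int × Int)) :=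
  let st0 : PVSt := ⟨0, 0, 0, List.replicate n.toNat 0, List.replicate n.toNat false⟩
  let st := pvLoopB graph time_to_do (pvFuel n graph) [(0, pvSons graph 0, 0)] st0
  (st.rtime, st.rcnt, (pvScan n st).items)

-- ===== PRECONDITION & SPEC =====
-- the son-closure of {0}: every id the traversal could ever touch (plain successor closure of the
-- input's son lists; it runs neither port's algorithm — no counters, no visit accounting)
def pvAdd (S : List Int) (x : Int) : List Int := if x ∈ S then S else S ++ [x]
def pvStep (graph : List (Int × List Int)) (S : List Int) : List Int :=
  (S.flatMap (pvSons graph)).foldl pvAdd S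
def pvReach (graph : List (Int × List Int)) : List Int :=
  (pvStep graph)^[(graph.flatMap (fun p => p.2)).length + 1] [0]

-- Pre_ excludes exactly the crash shapes: n < 1 (IndexError on used[0]) or, anywhere in the son-closure
-- of node 0, an id outside the Python index range [-n, n) or [-len(time_to_do), len(time_to_do))
-- (IndexError) or without a graph entry (KeyError). Conservative only on ids in the closure that the
-- run skips because their ±n alias was stamped first (see cites).
def Pre_generate_support_data (n : Int) (graph : List (Int × List Int)) (time_to_do : List Int) : Prop :=
  1 ≤ n ∧
  ((pvReach graph).all fun nd =>
      decide (-n ≤ nd ∧ nd < n) &&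
      decide (-(time_to_do.length : Int) ≤ nd ∧ nd < (time_to_do.length : Int)) &&
      (PySem.Dict.mk graph).contains nd) = true
instance (n : Int) (graph : List (Int × List Int)) (time_to_do : List Int) : Decidable (Pre_generate_support_data n graph time_to_do) := by unfold Pre_generate_support_data; infer_instance

def pvWitness_generate_support_data : Int × (List (Int × List Int)) × List Int :=
  (2, [(0, [1]), (1, [])], [3, 4])

def Spec_generate_support_data (n : Int) (graph : List (Int × List Int)) (time_to_do : List Int) (out : Int × Int × (List (Int × Int))) : Prop := out = generate_support_data_alt n graph time_to_do
instance (n : Int) (graph : List (Int × List Int)) (time_to_do : List Int) (out : Int × Int × (List (Int × Int))) : Decidable (Spec_generate_support_data n graph time_to_do out) := by unfold Spec_generate_support_data; infer_instance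

-- ===== CLAIM (what is proved, stated in full; the proofs are below) =====
def Claim_equal_generate_support_data : Prop := ∀ (n : Int) (graph : List (Int × List Int)) (time_to_do : List Int), Dom_generate_support_data n graph time_to_do → Pre_generate_support_data n graph time_to_do → Spec_generate_support_data n graph time_to_do (generate_support_data n graph time_to_do)

-- ===== LEMMAS AND PROOFS =====

-- positions: Python index v in [-L, L) denotes Nat position pvPos L v
def pvInR (L : Nat) (v : Int) : Prop := -(L : Int) ≤ v ∧ v < (L : Int)
def pvPos (L : Nat) (v : Int) : Nat := if 0 ≤ v then v.toNat else L - (-v).toNat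

lemma pvIdx_inR {L : Nat} {v : Int} (h : pvInR L v) :
    PySem.List.pyIdx? L v = some (pvPos L v) := by
  unfold PySem.List.pyIdx? pvPos
  rcases h with ⟨h1, h2⟩
  split_ifs with h3 h4 h5 <;> simp_all <;> omega

lemma pvPos_lt {L : Nat} {v : Int} (h : pvInR L v) : pvPos L v < L := by
  rcases h with ⟨h1, h2⟩
  unfold pvPos
  split_ifs with h3 <;> omega

lemma pvGetI_eq {l : List Int} {v : Int} (h : pvInR l.length v) :
    pvGetI l v = l.getD (pvPos l.length v) 0 := by
  unfold pvGetI PySem.List.pyGet?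
  rw [pvIdx_inR h]
  simp [List.getD_eq_getElem?_getD]

lemma pvGetB_eq {l : List Bool} {v : Int} (h : pvInR l.length v) :
    pvGetB l v = l.getD (pvPos l.length v) false := by
  unfold pvGetB PySem.List.pyGet?
  rw [pvIdx_inR h]
  simp [List.getD_eq_getElem?_getD]

lemma pvSetI_eq {l : List Int} {v : Int} (h : pvInR l.length v) (x : Int) :
    pvSetI l v x = l.set (pvPos l.length v) x := by
  unfold pvSetI PySem.List.pySetD PySem.List.pySet?
  rw [pvIdx_inR h]
  rfl

lemma pvSetB_eq {l : List Bool} {v : Int} (h : pvInR l.length v) (x : Bool) :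
    pvSetB l v x = l.set (pvPos l.length v) x := by
  unfold pvSetB PySem.List.pySetD PySem.List.pySet?
  rw [pvIdx_inR h]
  rfl

lemma pv_length_setI (l : List Int) (v x) : (pvSetI l v x).length = l.length := by
  unfold pvSetI PySem.List.pySetD PySem.List.pySet?
  cases PySem.List.pyIdx? l.length v <;> simp

lemma pv_length_setB (l : List Bool) (v x) : (pvSetB l v x).length = l.length := by
  unfold pvSetB PySem.List.pySetD PySem.List.pySet?
  cases PySem.List.pyIdx? l.length v <;> simp

lemma pv_getD_set_self {α : Type} [Inhabited α] (l : List α) (p : Nat) (h : p < l.length) (a d : α) :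
    (l.set p a).getD p d = a := by
  simp [List.getD_eq_getElem?_getD, List.getElem?_set, h]

lemma pv_getD_set_ne {α : Type} (l : List α) {p q : Nat} (h : p ≠ q) (a : α) (d : α) :
    (l.set p a).getD q d = l.getD q d := by
  simp [List.getD_eq_getElem?_getD, List.getElem?_set, h]

lemma pv_set_getD_self (l : List Bool) (p : Nat) (h : l.getD p false = true) :
    l.set p true = l := by
  have hlt : p < l.length := by
    by_contra hge
    rw [List.getD_eq_getElem?_getD, List.getElem?_eq_none (by omega)] at h
    simp at h
  apply List.ext_getElem?
  intro q
  by_cases hq : q = p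
  · subst hq
    rw [List.getElem?_set_self' ]
    rw [List.getD_eq_getElem?_getD] at h
    cases hg : l[q]? with
    | none => rw [hg] at h; simp at h
    | some b =>
      rw [hg] at h; simp at h
      simp [hg, h]
  · rw [List.getElem?_set_ne (by omega)]
lemma pv_patch_nil (c : List Int) : pvPatch [] c = c := rfl

lemma pv_patch_cons (fr : Int × List Int × Int) (frs : List (Int × List Int × Int)) (c : List Int) :
    pvPatch (fr :: frs) c = pvPatch frs (if fr.2.2 ≠ 0 then pvSetI c fr.1 fr.2.2 else c) := rfl

lemma pv_patch_length (frs : List (Int × List Int × Int)) (c : List Int) :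
    (pvPatch frs c).length = c.length := by
  induction frs generalizing c with
  | nil => rfl
  | cons fr frs ih =>
    rw [pv_patch_cons, ih]
    split <;> simp [pv_length_setI]

lemma pv_patch_getD (frs : List (Int × List Int × Int)) (c : List Int) (p : Nat)
    (h : ∀ fr ∈ frs, pvInR c.length fr.1 ∧ pvPos c.length fr.1 ≠ p) :
    (pvPatch frs c).getD p 0 = c.getD p 0 := by
  induction frs generalizing c with
  | nil => rfl
  | cons fr frs ih =>
    rw [pv_patch_cons]
    have hfr := h fr (by simp)
    split
    · rw [ih _ (by
        intro g hg
        have := h g (by simp [hg])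
        simpa [pv_length_setI] using this)]
      rw [pvSetI_eq hfr.1, pv_getD_set_ne _ hfr.2]
    · exact ih _ (fun g hg => h g (by simp [hg]))

lemma pv_patch_getD_mem (frs : List (Int × List Int × Int)) (c : List Int)
    (fr : Int × List Int × Int) (hmem : fr ∈ frs) (hlast : fr.2.2 ≠ 0)
    (hInR : ∀ g ∈ frs, pvInR c.length g.1)
    (hpw : frs.Pairwise (fun a b => pvPos c.length a.1 ≠ pvPos c.length b.1)) :
    (pvPatch frs c).getD (pvPos c.length fr.1) 0 = fr.2.2 := by
  induction frs generalizing c with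
  | nil => simp at hmem
  | cons g frs ih =>
    rw [pv_patch_cons]
    rcases List.mem_cons.mp hmem with heq | hmem'
    · subst heq
      rw [if_pos hlast]
      have h1 : pvInR c.length fr.1 := hInR fr (by simp)
      rw [pv_patch_getD _ _ _ (by
        intro g hg
        refine ⟨by simpa [pv_length_setI] using hInR g (by simp [hg]), ?_⟩
        have := (List.pairwise_cons.mp hpw).1 g hg
        simpa [pv_length_setI] using fun hh => this hh.symm)]
      · rw [pvSetI_eq h1, pv_getD_set_self _ _ (pvPos_lt h1)]
    · have hlen : ∀ X : List Int, X.length = c.length →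
          (pvPatch frs X).getD (pvPos c.length fr.1) 0 = fr.2.2 → True := fun _ _ _ => trivial
      split
      · have hlg : (pvSetI c g.1 g.2.2).length = c.length := pv_length_setI _ _ _
        have := ih (pvSetI c g.1 g.2.2) hmem'
          (by intro x hx; rw [hlg]; exact hInR x (by simp [hx]))
          (by rw [hlg]; exact (List.pairwise_cons.mp hpw).2)
        rwa [hlg] at this
      · exact ih c hmem' (fun x hx => hInR x (by simp [hx])) (List.pairwise_cons.mp hpw).2

lemma pvSetI_comm (c : List Int) (u v : Int) (hu : pvInR c.length u) (hv : pvInR c.length v)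
    (hne : pvPos c.length u ≠ pvPos c.length v) (a b : Int) :
    pvSetI (pvSetI c u a) v b = pvSetI (pvSetI c v b) u a := by
  rw [pvSetI_eq hu, pvSetI_eq hv,
      pvSetI_eq (l := c.set (pvPos c.length u) a) (by simpa using hv),
      pvSetI_eq (l := c.set (pvPos c.length v) b) (by simpa using hu)]
  simp only [List.length_set]
  exact List.set_comm _ _ hne

lemma pv_patch_setI_comm (frs : List (Int × List Int × Int)) (c : List Int) (v : Int) (x : Int)
    (hv : pvInR c.length v)
    (h : ∀ fr ∈ frs, pvInR c.length fr.1 ∧ pvPos c.length fr.1 ≠ pvPos c.length v) :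
    pvSetI (pvPatch frs c) v x = pvPatch frs (pvSetI c v x) := by
  induction frs generalizing c with
  | nil => rfl
  | cons fr frs ih =>
    rw [pv_patch_cons, pv_patch_cons]
    have hfr := h fr (by simp)
    have hlc : (pvSetI c v x).length = c.length := pv_length_setI _ _ _
    split
    · have hlf : (pvSetI c fr.1 fr.2.2).length = c.length := pv_length_setI _ _ _
      rw [ih _ (by simpa [hlf] using hv) (by
        intro g hg
        have := h g (by simp [hg])
        simpa [hlf] using this)]
      congr 1
      exact pvSetI_comm c fr.1 v hfr.1 hv hfr.2 fr.2.2 x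
    · exact ih c hv (fun g hg => h g (by simp [hg]))
lemma pv_patch_getD_nonzero (frs : List (Int × List Int × Int)) (c : List Int) (p : Nat)
    (hInR : ∀ g ∈ frs, pvInR c.length g.1) (h : c.getD p 0 ≠ 0) :
    (pvPatch frs c).getD p 0 ≠ 0 := by
  induction frs generalizing c with
  | nil => exact h
  | cons fr frs ih =>
    rw [pv_patch_cons]
    split
    · rename_i hlast
      refine ih _ (by intro g hg; simpa [pv_length_setI] using hInR g (by simp [hg])) ?_
      rw [pvSetI_eq (hInR fr (by simp))]
      by_cases hp : pvPos c.length fr.1 = p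
      · rw [hp, pv_getD_set_self _ _ (hp ▸ pvPos_lt (hInR fr (by simp)))]; exact hlast
      · rwa [pv_getD_set_ne _ hp]
    · exact ih c (fun g hg => hInR g (by simp [hg])) h

-- ---- closure of pvReach ----
lemma pvAdd_subset (S : List Int) (x : Int) : S ⊆ pvAdd S x := by
  unfold pvAdd; split <;> simp

lemma pv_foldl_add_subset (xs S : List Int) : S ⊆ xs.foldl pvAdd S := by
  induction xs generalizing S with
  | nil => simp
  | cons x xs ih => exact fun a ha => ih (pvAdd S x) (pvAdd_subset S x ha)

lemma pvAdd_length (S : List Int) (x : Int) : S.length ≤ (pvAdd S x).length := by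
  unfold pvAdd; split <;> simp

lemma pv_foldl_add_length (xs S : List Int) : S.length ≤ (xs.foldl pvAdd S).length := by
  induction xs generalizing S with
  | nil => simp
  | cons x xs ih => exact le_trans (pvAdd_length S x) (ih (pvAdd S x))

lemma pvAdd_eq_iff (S : List Int) (x : Int) (h : pvAdd S x = S) : x ∈ S := by
  unfold pvAdd at h
  split at h
  · assumption
  · have := congrArg List.length h; simp at this

lemma pv_foldl_add_eq (xs S : List Int) (h : xs.foldl pvAdd S = S) : ∀ x ∈ xs, x ∈ S := by
  induction xs generalizing S with
  | nil => simp
  | cons x xs ih =>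
    simp only [List.foldl_cons] at h
    have h1 : pvAdd S x = S := by
      have l1 : S.length ≤ (pvAdd S x).length := pvAdd_length S x
      have l2 : (pvAdd S x).length ≤ (xs.foldl pvAdd (pvAdd S x)).length := pv_foldl_add_length _ _
      rw [h] at l2
      unfold pvAdd
      unfold pvAdd at l1 l2
      split <;> split at l2 <;> simp_all
    rw [h1] at h
    intro y hy
    rcases List.mem_cons.mp hy with rfl | hy'
    · exact pvAdd_eq_iff S y h1
    · exact ih S h y hy'

lemma pv_step_fixed_closed (g : List (Int × List Int)) (S : List Int) (h : pvStep g S = S) :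
    ∀ v ∈ S, ∀ s ∈ pvSons g v, s ∈ S := by
  intro v hv s hs
  exact pv_foldl_add_eq _ _ h s (List.mem_flatMap.mpr ⟨v, hv, hs⟩)

lemma pv_foldl_add_append (xs S : List Int) : ∃ t, xs.foldl pvAdd S = S ++ t := by
  induction xs generalizing S with
  | nil => exact ⟨[], by simp⟩
  | cons x xs ih =>
    by_cases hx : x ∈ S
    · have h1 : pvAdd S x = S := by unfold pvAdd; simp [hx]
      simpa [List.foldl_cons, h1] using ih S
    · have h1 : pvAdd S x = S ++ [x] := by unfold pvAdd; simp [hx]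
      rcases ih (S ++ [x]) with ⟨t, ht⟩
      exact ⟨[x] ++ t, by simp only [List.foldl_cons, h1]; rw [ht]; simp⟩

lemma pv_step_ne_lt (g : List (Int × List Int)) (S : List Int) (h : pvStep g S ≠ S) :
    S.length < (pvStep g S).length := by
  rcases pv_foldl_add_append (S.flatMap (pvSons g)) S with ⟨t, ht⟩
  unfold pvStep at h ⊢
  rw [ht] at h ⊢
  cases t with
  | nil => simp at h
  | cons a t => simp

lemma pv_mem_foldl_add (xs S : List Int) (y : Int) (h : y ∈ xs.foldl pvAdd S) :
    y ∈ S ∨ y ∈ xs := by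
  induction xs generalizing S with
  | nil => exact Or.inl (by simpa using h)
  | cons x xs ih =>
    simp only [List.foldl_cons] at h
    rcases ih (pvAdd S x) h with h1 | h1
    · unfold pvAdd at h1
      split at h1
      · exact Or.inl h1
      · rcases List.mem_append.mp h1 with h2 | h2
        · exact Or.inl h2
        · simp at h2; simp [h2]
    · simp [h1]

lemma pv_sons_sub (g : List (Int × List Int)) (v : Int) :
    ∀ s ∈ pvSons g v, s ∈ g.flatMap (fun p => p.2) := by
  unfold pvSons
  rw [PySem.Dict.getD_eq_get?_getD]
  induction g with
  | nil =>
    intro s hs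
    simp only [show PySem.Dict.mk ([] : List (Int × List Int)) = PySem.Dict.empty from rfl,
      PySem.Dict.get?_empty, Option.getD_none] at hs
    simp at hs
  | cons e g ih =>
    rcases e with ⟨k, val⟩
    rw [PySem.Dict.get?_mk_cons]
    split
    · intro s hs; simp only [Option.getD_some] at hs
      exact List.mem_flatMap.mpr ⟨(k, val), by simp, hs⟩
    · intro s hs
      have := ih s hs
      simp only [List.flatMap_cons]
      exact List.mem_append_right _ this

lemma pv_iter_mem (g : List (Int × List Int)) (i : Nat) (y : Int)
    (h : y ∈ (pvStep g)^[i] [0]) : y ∈ (0 : Int) :: g.flatMap (fun p => p.2) := by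
  induction i generalizing y with
  | zero =>
    simp only [Function.iterate_zero, id_eq, List.mem_singleton] at h
    simp [h]
  | succ i ih =>
    rw [Function.iterate_succ_apply'] at h
    unfold pvStep at h
    rcases pv_mem_foldl_add _ _ _ h with h1 | h1
    · exact ih y h1
    · rcases List.mem_flatMap.mp h1 with ⟨v, _, hs⟩
      exact List.mem_cons_of_mem _ (pv_sons_sub g v y hs)

lemma pvAdd_nodup (S : List Int) (x : Int) (h : S.Nodup) : (pvAdd S x).Nodup := by
  unfold pvAdd; split
  · exact h
  · rename_i hx
    rw [List.nodup_append]
    exact ⟨h, by simp, by simp [List.disjoint_singleton]; exact fun a ha hax => hx (hax ▸ ha)⟩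

lemma pv_foldl_add_nodup (xs S : List Int) (h : S.Nodup) : (xs.foldl pvAdd S).Nodup := by
  induction xs generalizing S with
  | nil => exact h
  | cons x xs ih => exact ih _ (pvAdd_nodup S x h)

lemma pv_iter_nodup (g : List (Int × List Int)) (i : Nat) : ((pvStep g)^[i] [0]).Nodup := by
  induction i with
  | zero => simp
  | succ i ih =>
    rw [Function.iterate_succ_apply']
    exact pv_foldl_add_nodup _ _ ih

lemma pv_nodup_length_le (l M : List Int) (hn : l.Nodup) (hs : ∀ y ∈ l, y ∈ M) :
    l.length ≤ M.length := by
  have h1 : l.toFinset.card = l.length := List.toFinset_card_of_nodup hn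
  have h2 : l.toFinset ⊆ M.toFinset := by
    intro a ha
    rw [List.mem_toFinset] at ha ⊢
    exact hs a ha
  calc l.length = l.toFinset.card := h1.symm
    _ ≤ M.toFinset.card := Finset.card_le_card h2
    _ ≤ M.length := List.toFinset_card_le M

lemma pvReach_closed (g : List (Int × List Int)) :
    ∀ v ∈ pvReach g, ∀ s ∈ pvSons g v, s ∈ pvReach g := by
  set K := (g.flatMap (fun p => p.2)).length + 1 with hK
  have hbound : ∀ i : Nat, ((pvStep g)^[i] [0]).length ≤ K := by
    intro i
    have := pv_nodup_length_le ((pvStep g)^[i] [0]) ((0 : Int) :: g.flatMap (fun p => p.2))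
      (pv_iter_nodup g i) (pv_iter_mem g i)
    simpa [hK] using this
  have hfix : ∃ i < K, pvStep g ((pvStep g)^[i] [0]) = (pvStep g)^[i] [0] := by
    by_contra hno
    simp only [not_exists, not_and] at hno
    have hgrow : ∀ i : Nat, i ≤ K → i + 1 ≤ ((pvStep g)^[i] [0]).length := by
      intro i
      induction i with
      | zero => simp
      | succ i ih =>
        intro hle
        have h1 := ih (by omega)
        have h2 := pv_step_ne_lt g ((pvStep g)^[i] [0]) (hno i (by omega))
        rw [Function.iterate_succ_apply']
        omega
    have := hgrow K (le_refl K)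
    have := hbound K
    omega
  rcases hfix with ⟨i, hiK, hfixi⟩
  have hstable : pvReach g = (pvStep g)^[i] [0] := by
    unfold pvReach
    rw [← hK, show K = (K - i) + i by omega, Function.iterate_add_apply]
    exact Function.iterate_fixed hfixi (K - i)
  rw [hstable]
  exact pv_step_fixed_closed g _ hfixi

lemma pvReach_zero_mem (g : List (Int × List Int)) : (0 : Int) ∈ pvReach g := by
  unfold pvReach
  generalize (g.flatMap (fun p => p.2)).length + 1 = K
  induction K with
  | zero => simp
  | succ K ih =>
    rw [Function.iterate_succ_apply']
    exact pv_foldl_add_subset _ _ ih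
-- length-parametrised forms of the bridge lemmas
lemma pvGetI_eqL {l : List Int} {v : Int} {L : Nat} (hl : l.length = L) (h : pvInR L v) :
    pvGetI l v = l.getD (pvPos L v) 0 := by subst hl; exact pvGetI_eq h
lemma pvGetB_eqL {l : List Bool} {v : Int} {L : Nat} (hl : l.length = L) (h : pvInR L v) :
    pvGetB l v = l.getD (pvPos L v) false := by subst hl; exact pvGetB_eq h
lemma pvSetI_eqL {l : List Int} {v : Int} {L : Nat} (hl : l.length = L) (h : pvInR L v) (x : Int) :
    pvSetI l v x = l.set (pvPos L v) x := by subst hl; exact pvSetI_eq h x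
lemma pvSetB_eqL {l : List Bool} {v : Int} {L : Nat} (hl : l.length = L) (h : pvInR L v) (x : Bool) :
    pvSetB l v x = l.set (pvPos L v) x := by subst hl; exact pvSetB_eq h x

lemma pvSetI_same {c : List Int} {v : Int} {L : Nat} (hl : c.length = L) (h : pvInR L v) (a b : Int) :
    pvSetI (pvSetI c v a) v b = pvSetI c v b := by
  have h1 : (c.set (pvPos L v) a).length = L := by simp [hl]
  rw [pvSetI_eqL hl h a, pvSetI_eqL h1 h b, List.set_set, pvSetI_eqL hl h b]

-- one-step unfoldings of the two loops
lemma pvLoopA_step (g : List (Int × List Int)) (tt : List Int) (f : Nat) (nd i : Int)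
    (rest : List (Int × Int)) (st : PVSt) :
    pvLoopA g tt (f + 1) ((nd, i) :: rest) st =
      if ((pvSons g nd).length : Int) ≤ i then pvLoopA g tt f rest (pvVisit tt st nd)
      else if pvGetI (pvVisit tt st nd).cids (pvGetI (pvSons g nd) i) = 0 then
        pvLoopA g tt f ((pvGetI (pvSons g nd) i, 0) :: (nd, i + 1) :: rest) (pvVisit tt st nd)
      else pvLoopA g tt f ((nd, i + 1) :: rest) (pvVisit tt st nd) := rfl

lemma pvLoopB_step_nil (g : List (Int × List Int)) (tt : List Int) (f : Nat) (v last : Int)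
    (frs : List (Int × List Int × Int)) (st : PVSt) :
    pvLoopB g tt (f + 1) ((v, [], last) :: frs) st =
      if last = 0 then
        pvLoopB g tt f frs ⟨st.counter + 1, st.rtime + pvGetI tt v, st.rcnt + 1,
          pvSetI st.cids v (st.counter + 1), pvSetB st.used v true⟩
      else
        pvLoopB g tt f frs ⟨st.counter + 1, st.rtime, st.rcnt,
          pvSetI st.cids v (st.counter + 1), st.used⟩ := by
  by_cases h0 : last = 0 <;> simp only [pvLoopB, h0, reduceIte]

lemma pvLoopB_step_cons (g : List (Int × List Int)) (tt : List Int) (f : Nat) (v last son : Int)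
    (rem' : List Int) (frs : List (Int × List Int × Int)) (st : PVSt) :
    pvLoopB g tt (f + 1) ((v, son :: rem', last) :: frs) st =
      (if pvGetB (if last = 0 then pvSetB st.used v true else st.used) son = true then
        pvLoopB g tt f ((v, rem', st.counter + 1) :: frs)
          (if last = 0 then
            (⟨st.counter + 1, st.rtime + pvGetI tt v, st.rcnt + 1, st.cids, pvSetB st.used v true⟩ : PVSt)
          else ⟨st.counter + 1, st.rtime, st.rcnt, st.cids, st.used⟩)
      else
        pvLoopB g tt f ((son, pvSons g son, 0) :: (v, rem', st.counter + 1) :: frs)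
          (if last = 0 then
            (⟨st.counter + 1, st.rtime + pvGetI tt v, st.rcnt + 1, st.cids, pvSetB st.used v true⟩ : PVSt)
          else ⟨st.counter + 1, st.rtime, st.rcnt, st.cids, st.used⟩)) := by
  by_cases h0 : last = 0 <;> simp only [pvLoopB, h0, reduceIte]
lemma pvVisit_eq (tt : List Int) (S : PVSt) (nd : Int) :
    pvVisit tt S nd = ⟨S.counter + 1,
      if pvGetB S.used nd = false then S.rtime + pvGetI tt nd else S.rtime,
      if pvGetB S.used nd = false then S.rcnt + 1 else S.rcnt,
      pvSetI S.cids nd (S.counter + 1), pvSetB S.used nd true⟩ := rfl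

-- the lock-step simulation: A's (node, next-child-index) stack machine against B's iterator stack,
-- one fuel unit per A-pop = per B-iteration; A's cids carry, in addition to B's, exactly the
-- latest-tick stamps of the live frames (pvPatch)
lemma pvSim (g : List (Int × List Int)) (tt : List Int) (L : Nat)
    (hR : ∀ v ∈ pvReach g, pvInR L v) :
    ∀ (f : Nat) (frames : List (Int × List Int × Int)) (st : PVSt),
    st.cids.length = L → st.used.length = L → 0 ≤ st.counter →
    (∀ fr ∈ frames, fr.1 ∈ pvReach g) →
    (∀ fr ∈ frames, fr.2.1.length ≤ (pvSons g fr.1).length ∧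
        (pvSons g fr.1).drop ((pvSons g fr.1).length - fr.2.1.length) = fr.2.1) →
    (∀ fr ∈ frames, pvGetI st.cids fr.1 = 0) →
    (∀ fr ∈ frames, (fr.2.2 ≠ 0 → pvGetB st.used fr.1 = true) ∧
        (fr.2.2 = 0 → pvGetB st.used fr.1 = false ∧ fr.2.1 = pvSons g fr.1)) →
    (∀ fr ∈ frames.tail, fr.2.2 ≠ 0) →
    frames.Pairwise (fun a b => pvPos L a.1 ≠ pvPos L b.1) →
    (∀ p : Nat, p < L → st.cids.getD p 0 ≠ 0 → st.used.getD p false = true) →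
    (∀ p : Nat, p < L → st.used.getD p false = true →
        st.cids.getD p 0 ≠ 0 ∨ ∃ fr ∈ frames, pvPos L fr.1 = p) →
    pvLoopA g tt f (frames.map (fun fr => (fr.1, ((pvSons g fr.1).length : Int) - fr.2.1.length)))
        ⟨st.counter, st.rtime, st.rcnt, pvPatch frames st.cids, st.used⟩
      = pvLoopB g tt f frames st := by
  intro f
  induction f with
  | zero =>
    intro frames st _ _ _ _ _ _ _ _ _ _ _
    rfl
  | succ f ih =>
    intro frames st hcL huL hcnt hfrR hfrS hfrC hfrU htl hpw h7 h8
    cases frames with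
    | nil => rfl
    | cons fr frs =>
      obtain ⟨v, rem, last⟩ := fr
      have hvR : v ∈ pvReach g := hfrR (v, rem, last) (by simp)
      have hvIn : pvInR L v := hR v hvR
      have hpv : pvPos L v < L := pvPos_lt hvIn
      have hfrsR : ∀ x ∈ frs, x.1 ∈ pvReach g := fun x hx => hfrR x (by simp [hx])
      have hfrsIn : ∀ x ∈ frs, pvInR L x.1 := fun x hx => hR _ (hfrsR x hx)
      have hfrsLast : ∀ x ∈ frs, x.2.2 ≠ 0 := fun x hx => htl x (by simpa using hx)
      have hpw' := List.pairwise_cons.mp hpw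
      have hcne : st.counter + 1 ≠ 0 := by omega
      have hused_v : pvGetB st.used v = (if last = 0 then false else true) := by
        split
        · exact ((hfrU (v, rem, last) (by simp)).2 (by assumption)).1
        · exact (hfrU (v, rem, last) (by simp)).1 (by assumption)
      -- abbreviations
      have hXL : (pvSetI st.cids v (st.counter + 1)).length = L := by
        rw [pv_length_setI]; exact hcL
      have hU1L : (pvSetB st.used v true).length = L := by
        rw [pv_length_setB]; exact huL
      have hCPL : (pvPatch frs (pvSetI st.cids v (st.counter + 1))).length = L := by
        rw [pv_patch_length]; exact hXL
      -- the key cids identity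
      have hCP : pvSetI (pvPatch ((v, rem, last) :: frs) st.cids) v (st.counter + 1)
          = pvPatch frs (pvSetI st.cids v (st.counter + 1)) := by
        rw [pv_patch_cons]
        by_cases h0 : last = 0
        · rw [if_neg (by simp [h0])]
          exact pv_patch_setI_comm frs st.cids v _ (by rw [hcL]; exact hvIn)
            (by
              intro x hx
              rw [hcL]
              exact ⟨hfrsIn x hx, fun he => (hpw'.1 x hx) he.symm⟩)
        · rw [if_pos (by simpa using h0),
              pv_patch_setI_comm frs _ v _ (by rw [pv_length_setI, hcL]; exact hvIn)
                (by
                  intro x hx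
                  rw [pv_length_setI, hcL]
                  exact ⟨hfrsIn x hx, fun he => (hpw'.1 x hx) he.symm⟩),
              pvSetI_same hcL hvIn]
      -- U1 at positions
      have hU1get : ∀ p : Nat, p < L →
          (pvSetB st.used v true).getD p false
            = (if p = pvPos L v then true else st.used.getD p false) := by
        intro p hp
        rw [pvSetB_eqL huL hvIn]
        by_cases hps : p = pvPos L v
        · rw [hps, if_pos rfl, pv_getD_set_self _ _ (by rw [huL]; exact hpv)]
        · rw [if_neg hps, pv_getD_set_ne _ (fun he => hps he.symm)]
      have hXget : ∀ p : Nat, p < L →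
          (pvSetI st.cids v (st.counter + 1)).getD p 0
            = (if p = pvPos L v then st.counter + 1 else st.cids.getD p 0) := by
        intro p hp
        rw [pvSetI_eqL hcL hvIn]
        by_cases hps : p = pvPos L v
        · rw [hps, if_pos rfl, pv_getD_set_self _ _ (by rw [hcL]; exact hpv)]
        · rw [if_neg hps, pv_getD_set_ne _ (fun he => hps he.symm)]
      -- frame positions in frs never collide with stamped-zero positions we reason about
      have hfrsUsed : ∀ x ∈ frs, st.used.getD (pvPos L x.1) false = true := by
        intro x hx
        have := (hfrU x (by simp [hx])).1 (hfrsLast x hx)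
        rwa [pvGetB_eqL huL (hfrsIn x hx)] at this
      have hfrsCid : ∀ x ∈ frs, st.cids.getD (pvPos L x.1) 0 = 0 := by
        intro x hx
        have := hfrC x (by simp [hx])
        rwa [pvGetI_eqL hcL (hfrsIn x hx)] at this
      have hvCid : st.cids.getD (pvPos L v) 0 = 0 := by
        have := hfrC (v, rem, last) (by simp)
        rwa [pvGetI_eqL hcL hvIn] at this
      -- CP values
      have hCPget_ne : ∀ p : Nat, p < L → (∀ x ∈ frs, pvPos L x.1 ≠ p) →
          (pvPatch frs (pvSetI st.cids v (st.counter + 1))).getD p 0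
            = (pvSetI st.cids v (st.counter + 1)).getD p 0 := by
        intro p hp hno
        apply pv_patch_getD
        intro x hx
        rw [hXL]
        exact ⟨hfrsIn x hx, hno x hx⟩
      have hUset : last ≠ 0 → pvSetB st.used v true = st.used := by
        intro h0
        rw [pvSetB_eqL huL hvIn]
        apply pv_set_getD_self
        have := hused_v
        rw [if_neg h0] at this
        rwa [pvGetB_eqL huL hvIn] at this
      -- A's pop, written with the shared (rt1, rc1, U1) abbreviations
      have hVis : pvVisit tt ⟨st.counter, st.rtime, st.rcnt,
            pvPatch ((v, rem, last) :: frs) st.cids, st.used⟩ v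
          = ⟨st.counter + 1,
              if last = 0 then st.rtime + pvGetI tt v else st.rtime,
              if last = 0 then st.rcnt + 1 else st.rcnt,
              pvPatch frs (pvSetI st.cids v (st.counter + 1)),
              pvSetB st.used v true⟩ := by
        rw [pvVisit_eq, hused_v]
        by_cases h0 : last = 0
        · subst h0; simp [hCP]
        · simp [h0, hCP]
      -- invariant re-establishment, shared pieces
      have hfrC' : ∀ x ∈ frs, pvGetI (pvSetI st.cids v (st.counter + 1)) x.1 = 0 := by
        intro x hx
        rw [pvGetI_eqL hXL (hfrsIn x hx), hXget _ (pvPos_lt (hfrsIn x hx)),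
            if_neg (fun he => (hpw'.1 x hx) he.symm)]
        exact hfrsCid x hx
      have hfrU' : ∀ x ∈ frs, pvGetB (pvSetB st.used v true) x.1 = true := by
        intro x hx
        rw [pvGetB_eqL hU1L (hfrsIn x hx), hU1get _ (pvPos_lt (hfrsIn x hx))]
        split
        · rfl
        · exact hfrsUsed x hx
      cases rem with
      | nil =>
        -- A pops the exhausted frame and drops it; B stamps v and pops
        have hBnil : pvLoopB g tt (f + 1) ((v, [], last) :: frs) st
            = pvLoopB g tt f frs ⟨st.counter + 1,
                if last = 0 then st.rtime + pvGetI tt v else st.rtime,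
                if last = 0 then st.rcnt + 1 else st.rcnt,
                pvSetI st.cids v (st.counter + 1), pvSetB st.used v true⟩ := by
          rw [pvLoopB_step_nil]
          by_cases h0 : last = 0 <;> simp [h0, hUset]
        rw [hBnil]
        simp only [List.map_cons]
        rw [pvLoopA_step, if_pos (by simp), hVis]
        exact ih frs ⟨st.counter + 1,
            if last = 0 then st.rtime + pvGetI tt v else st.rtime,
            if last = 0 then st.rcnt + 1 else st.rcnt,
            pvSetI st.cids v (st.counter + 1), pvSetB st.used v true⟩
          hXL hU1L (by show 0 ≤ st.counter + 1; omega)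
          hfrsR (fun x hx => hfrS x (by simp [hx])) hfrC'
          (by
            intro x hx
            exact ⟨fun _ => hfrU' x hx, fun h0 => absurd h0 (hfrsLast x hx)⟩)
          (fun x hx => hfrsLast x (List.mem_of_mem_tail hx))
          hpw'.2
          (by
            intro p hp hne
            rw [hXget p hp] at hne
            rw [hU1get p hp]
            by_cases hps : p = pvPos L v
            · simp [hps]
            · rw [if_neg hps] at hne ⊢
              exact h7 p hp hne)
          (by
            intro p hp htrue
            rw [hU1get p hp] at htrue
            rw [hXget p hp]
            by_cases hps : p = pvPos L v
            · exact Or.inl (by rw [if_pos hps]; exact hcne)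
            · rw [if_neg hps] at htrue ⊢
              rcases h8 p hp htrue with h | ⟨x, hx, hxp⟩
              · exact Or.inl h
              · rcases List.mem_cons.mp hx with rfl | hx'
                · exact absurd hxp.symm hps
                · exact Or.inr ⟨x, hx', hxp⟩)
      | cons son rem' =>
        have hlen1 : (son :: rem').length ≤ (pvSons g v).length :=
          (hfrS (v, son :: rem', last) (by simp)).1
        have hdrop : (pvSons g v).drop ((pvSons g v).length - (son :: rem').length)
            = son :: rem' := (hfrS (v, son :: rem', last) (by simp)).2
        have hsonmem : son ∈ pvSons g v := by
          have h0 : son ∈ (pvSons g v).drop ((pvSons g v).length - (son :: rem').length) := by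
            rw [hdrop]; simp
          exact List.mem_of_mem_drop h0
        have hsonR : son ∈ pvReach g := pvReach_closed g v hvR son hsonmem
        have hsIn : pvInR L son := hR son hsonR
        have hpslt : pvPos L son < L := pvPos_lt hsIn
        have hsonA : pvGetI (pvSons g v)
            (((pvSons g v).length : Int) - ((son :: rem').length : Int)) = son := by
          have hcast : ((pvSons g v).length : Int) - ((son :: rem').length : Int)
              = (((pvSons g v).length - (son :: rem').length : Nat) : Int) := by push_cast; omega
          rw [hcast]
          unfold pvGetI
          rw [PySem.List.pyGet?_natCast]
          have h0 : (pvSons g v)[(pvSons g v).length - (son :: rem').length]? = some son := by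
            have h1 := congrArg (fun l => l[0]?) hdrop
            simpa [List.getElem?_drop] using h1
          rw [h0]; rfl
        have hU1son : pvGetB (pvSetB st.used v true) son
            = (if pvPos L son = pvPos L v then true else st.used.getD (pvPos L son) false) := by
          rw [pvGetB_eqL hU1L hsIn, hU1get _ hpslt]
        have hCPson : pvGetI (pvPatch frs (pvSetI st.cids v (st.counter + 1))) son
            = (pvPatch frs (pvSetI st.cids v (st.counter + 1))).getD (pvPos L son) 0 :=
          pvGetI_eqL hCPL hsIn
        -- the two visit tests agree
        have hCPn : pvGetB (pvSetB st.used v true) son = true →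
            pvGetI (pvPatch frs (pvSetI st.cids v (st.counter + 1))) son ≠ 0 := by
          intro htr
          rw [hCPson]
          by_cases hps : pvPos L son = pvPos L v
          · rw [hps, hCPget_ne _ hpv (fun x hx he => (hpw'.1 x hx) he.symm),
                hXget _ hpv, if_pos rfl]
            exact hcne
          · rw [hU1son, if_neg hps] at htr
            rcases h8 _ hpslt htr with hnz | ⟨x, hx, hxp⟩
            · have hX : (pvSetI st.cids v (st.counter + 1)).getD (pvPos L son) 0 ≠ 0 := by
                rw [hXget _ hpslt, if_neg hps]; exact hnz
              exact pv_patch_getD_nonzero frs _ _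
                (fun y hy => by rw [hXL]; exact hfrsIn y hy) hX
            · rcases List.mem_cons.mp hx with rfl | hx'
              · exact absurd hxp.symm hps
              · have hm := pv_patch_getD_mem frs (pvSetI st.cids v (st.counter + 1)) x hx'
                  (hfrsLast x hx') (fun y hy => by rw [hXL]; exact hfrsIn y hy)
                  (by rw [hXL]; exact hpw'.2)
                rw [hXL] at hm
                rw [← hxp, hm]
                exact hfrsLast x hx'
        have hCPe : pvGetB (pvSetB st.used v true) son = false →
            pvGetI (pvPatch frs (pvSetI st.cids v (st.counter + 1))) son = 0 ∧
            pvPos L son ≠ pvPos L v ∧ st.used.getD (pvPos L son) false = false ∧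
            st.cids.getD (pvPos L son) 0 = 0 := by
          intro hfa
          rw [hU1son] at hfa
          have hps : pvPos L son ≠ pvPos L v := by
            intro he; rw [if_pos he] at hfa; cases hfa
          rw [if_neg hps] at hfa
          have hcz : st.cids.getD (pvPos L son) 0 = 0 := by
            by_contra hnz
            rw [h7 _ hpslt hnz] at hfa; cases hfa
          refine ⟨?_, hps, hfa, hcz⟩
          rw [hCPson, pv_patch_getD frs _ _ ?_, hXget _ hpslt, if_neg hps]
          · exact hcz
          · intro x hx
            rw [hXL]
            refine ⟨hfrsIn x hx, fun he => ?_⟩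
            have h1 := hfrsUsed x hx
            rw [he] at h1
            rw [h1] at hfa
            cases hfa
        -- unify B's branch state
        have hBU : (if last = 0 then pvSetB st.used v true else st.used)
            = pvSetB st.used v true := by
          by_cases h0 : last = 0 <;> simp [h0, hUset]
        have hB1 : (if last = 0 then
              (⟨st.counter + 1, st.rtime + pvGetI tt v, st.rcnt + 1, st.cids,
                pvSetB st.used v true⟩ : PVSt)
            else ⟨st.counter + 1, st.rtime, st.rcnt, st.cids, st.used⟩)
            = ⟨st.counter + 1,
                if last = 0 then st.rtime + pvGetI tt v else st.rtime,
                if last = 0 then st.rcnt + 1 else st.rcnt,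
                st.cids, pvSetB st.used v true⟩ := by
          by_cases h0 : last = 0 <;> simp [h0, hUset]
        have hP : pvPatch ((v, rem', st.counter + 1) :: frs) st.cids
            = pvPatch frs (pvSetI st.cids v (st.counter + 1)) := by
          rw [pv_patch_cons, if_pos (by simpa using hcne)]
        have hidx : ((pvSons g v).length : Int) - ((son :: rem').length : Int) + 1
            = ((pvSons g v).length : Int) - (rem'.length : Int) := by
          simp only [List.length_cons]; push_cast; omega
        have hdrop' : (pvSons g v).drop ((pvSons g v).length - rem'.length) = rem' := by
          have h1 := congrArg (List.drop 1) hdrop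
          rw [List.drop_drop] at h1
          have h2 : (pvSons g v).length - (son :: rem').length + 1
              = (pvSons g v).length - rem'.length := by simp at hlen1 ⊢; omega
          rw [h2] at h1
          simpa using h1
        rw [pvLoopB_step_cons, hBU, hB1]
        simp only [List.map_cons]
        rw [pvLoopA_step, if_neg (by simp only [List.length_cons] at hlen1 ⊢; push_cast; omega), hVis, hsonA]
        by_cases hfresh : pvGetB (pvSetB st.used v true) son = true
        · -- son already seen: advance the iterator
          rw [if_neg (hCPn hfresh), if_pos hfresh]
          have H := ih ((v, rem', st.counter + 1) :: frs)
            ⟨st.counter + 1,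
              if last = 0 then st.rtime + pvGetI tt v else st.rtime,
              if last = 0 then st.rcnt + 1 else st.rcnt,
              st.cids, pvSetB st.used v true⟩
            hcL hU1L (by show 0 ≤ st.counter + 1; omega)
            (by
              intro x hx
              rcases List.mem_cons.mp hx with rfl | hx'
              · exact hvR
              · exact hfrsR x hx')
            (by
              intro x hx
              rcases List.mem_cons.mp hx with rfl | hx'
              · constructor
                · show rem'.length ≤ (pvSons g v).length
                  simp at hlen1; omega
                · exact hdrop'
              · exact hfrS x (by simp [hx']))
            (by
              intro x hx
              rcases List.mem_cons.mp hx with rfl | hx'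
              · exact hfrC (v, son :: rem', last) (by simp)
              · exact hfrC x (by simp [hx']))
            (by
              intro x hx
              rcases List.mem_cons.mp hx with rfl | hx'
              · refine ⟨fun _ => ?_, fun h0 => absurd h0 (by simpa using hcne)⟩
                rw [pvGetB_eqL hU1L hvIn, hU1get _ hpv, if_pos rfl]
              · exact ⟨fun _ => hfrU' x hx', fun h0 => absurd h0 (hfrsLast x hx')⟩)
            (by
              intro x hx
              simp only [List.tail_cons] at hx
              exact hfrsLast x hx)
            (List.pairwise_cons.mpr ⟨fun b hb => hpw'.1 b hb, hpw'.2⟩)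
            (by
              intro p hp hnz
              rw [hU1get p hp]
              split
              · rfl
              · exact h7 p hp hnz)
            (by
              intro p hp htrue
              rw [hU1get p hp] at htrue
              by_cases hps : p = pvPos L v
              · exact Or.inr ⟨(v, rem', st.counter + 1), by simp, hps.symm⟩
              · rw [if_neg hps] at htrue
                rcases h8 p hp htrue with h | ⟨x, hx, hxp⟩
                · exact Or.inl h
                · rcases List.mem_cons.mp hx with rfl | hx'
                  · exact absurd hxp.symm hps
                  · exact Or.inr ⟨x, by simp [hx'], hxp⟩)
          simp only [List.map_cons, hP] at H
          rw [← hidx] at H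
          exact H
        · -- son unseen: push its frame
          have hfa : pvGetB (pvSetB st.used v true) son = false := by
            simpa using hfresh
          obtain ⟨hcp0, hps, huf, hcz⟩ := hCPe hfa
          rw [if_pos hcp0, if_neg (show ¬ pvGetB (pvSetB st.used v true) son = true by simp [hfa])]
          have hsonused : pvGetB (pvSetB st.used v true) son = false := hfa
          have H := ih ((son, pvSons g son, 0) :: (v, rem', st.counter + 1) :: frs)
            ⟨st.counter + 1,
              if last = 0 then st.rtime + pvGetI tt v else st.rtime,
              if last = 0 then st.rcnt + 1 else st.rcnt,
              st.cids, pvSetB st.used v true⟩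
            hcL hU1L (by show 0 ≤ st.counter + 1; omega)
            (by
              intro x hx
              rcases List.mem_cons.mp hx with rfl | hx'
              · exact hsonR
              rcases List.mem_cons.mp hx' with rfl | hx''
              · exact hvR
              · exact hfrsR x hx'')
            (by
              intro x hx
              rcases List.mem_cons.mp hx with rfl | hx'
              · exact ⟨le_refl _, by simp⟩
              rcases List.mem_cons.mp hx' with rfl | hx''
              · constructor
                · show rem'.length ≤ (pvSons g v).length
                  simp at hlen1; omega
                · exact hdrop'
              · exact hfrS x (by simp [hx'']))
            (by
              intro x hx
              rcases List.mem_cons.mp hx with rfl | hx'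
              · rw [pvGetI_eqL hcL hsIn]; exact hcz
              rcases List.mem_cons.mp hx' with rfl | hx''
              · exact hfrC (v, son :: rem', last) (by simp)
              · exact hfrC x (by simp [hx'']))
            (by
              intro x hx
              rcases List.mem_cons.mp hx with rfl | hx'
              · exact ⟨fun h0 => absurd rfl h0, fun _ => ⟨hsonused, rfl⟩⟩
              rcases List.mem_cons.mp hx' with rfl | hx''
              · refine ⟨fun _ => ?_, fun h0 => absurd h0 (by simpa using hcne)⟩
                rw [pvGetB_eqL hU1L hvIn, hU1get _ hpv, if_pos rfl]
              · exact ⟨fun _ => hfrU' x hx'', fun h0 => absurd h0 (hfrsLast x hx'')⟩)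
            (by
              intro x hx
              simp only [List.tail_cons] at hx
              rcases List.mem_cons.mp hx with rfl | hx'
              · simpa using hcne
              · exact hfrsLast x hx')
            (by
              refine List.pairwise_cons.mpr ⟨?_, List.pairwise_cons.mpr ⟨fun b hb => hpw'.1 b hb, hpw'.2⟩⟩
              intro b hb
              rcases List.mem_cons.mp hb with rfl | hb'
              · exact hps
              · intro he
                rw [he] at huf
                rw [hfrsUsed b hb'] at huf
                cases huf)
            (by
              intro p hp hnz
              rw [hU1get p hp]
              split
              · rfl
              · exact h7 p hp hnz)
            (by
              intro p hp htrue
              rw [hU1get p hp] at htrue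
              by_cases hps' : p = pvPos L v
              · exact Or.inr ⟨(v, rem', st.counter + 1), by simp, hps'.symm⟩
              · rw [if_neg hps'] at htrue
                rcases h8 p hp htrue with h | ⟨x, hx, hxp⟩
                · exact Or.inl h
                · rcases List.mem_cons.mp hx with rfl | hx'
                  · exact absurd hxp.symm hps'
                  · exact Or.inr ⟨x, by simp [hx'], hxp⟩)
          have hP2 : pvPatch ((son, pvSons g son, 0) :: (v, rem', st.counter + 1) :: frs) st.cids
              = pvPatch frs (pvSetI st.cids v (st.counter + 1)) := by
            rw [pv_patch_cons, if_neg (by simp)]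
            exact hP
          simp only [List.map_cons, hP2] at H
          rw [← hidx] at H
          simp only [sub_self] at H
          exact H
lemma pv_repl_getD {α : Type} (L p : Nat) (a : α) : (List.replicate L a).getD p a = a := by
  rw [List.getD_eq_getElem?_getD, List.getElem?_replicate]
  split <;> rfl

lemma pvGetI_repl (L : Nat) (v : Int) : pvGetI (List.replicate L (0 : Int)) v = 0 := by
  unfold pvGetI
  cases h : PySem.List.pyGet? (List.replicate L (0 : Int)) v with
  | none => rfl
  | some x =>
    have hm := PySem.List.mem_of_pyGet?_eq_some _ h
    rw [List.eq_of_mem_replicate hm]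
    rfl

lemma pvGetB_repl (L : Nat) (v : Int) : pvGetB (List.replicate L false) v = false := by
  unfold pvGetB
  cases h : PySem.List.pyGet? (List.replicate L false) v with
  | none => rfl
  | some x =>
    have hm := PySem.List.mem_of_pyGet?_eq_some _ h
    rw [List.eq_of_mem_replicate hm]
    rfl
-- ===== VERDICT (by name: the statement is the Claim_ definition above) =====
theorem generate_support_data_spec : Claim_equal_generate_support_data := by
  intro n g tt _ hpre
  obtain ⟨hn, hall⟩ := hpre
  unfold Spec_generate_support_data generate_support_data generate_support_data_alt
  have hcast : ((n.toNat : Nat) : Int) = n := Int.toNat_of_nonneg (by omega)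
  have hR : ∀ v ∈ pvReach g, pvInR n.toNat v := by
    intro v hv
    have h1 := List.all_eq_true.mp hall v hv
    simp only [Bool.and_eq_true, decide_eq_true_eq] at h1
    exact ⟨by rw [hcast]; exact h1.1.1.1, by rw [hcast]; exact h1.1.1.2⟩
  have H := pvSim g tt n.toNat hR (pvFuel n g) [(0, pvSons g 0, 0)]
    ⟨0, 0, 0, List.replicate n.toNat 0, List.replicate n.toNat false⟩
    (by simp) (by simp) (le_refl 0)
    (by
      intro x hx
      simp only [List.mem_singleton] at hx
      subst hx
      exact pvReach_zero_mem g)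
    (by
      intro x hx
      simp only [List.mem_singleton] at hx
      subst hx
      exact ⟨le_refl _, by simp⟩)
    (by
      intro x hx
      simp only [List.mem_singleton] at hx
      subst hx
      exact pvGetI_repl _ _)
    (by
      intro x hx
      simp only [List.mem_singleton] at hx
      subst hx
      exact ⟨fun h0 => absurd rfl h0, fun _ => ⟨pvGetB_repl _ _, rfl⟩⟩)
    (by intro x hx; simp at hx)
    (by simp)
    (by
      intro p hp hnz
      exact absurd (pv_repl_getD _ _ _) hnz)
    (by
      intro p hp htrue
      rw [pv_repl_getD] at htrue
      cases htrue)
  have hpatch : pvPatch [((0 : Int), pvSons g 0, (0 : Int))] (List.replicate n.toNat 0)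
      = List.replicate n.toNat 0 := by
    rw [pv_patch_cons, if_neg (by simp), pv_patch_nil]
  simp only [List.map_cons, List.map_nil, sub_self, hpatch] at H
  simp only [H]
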